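-- pv_equiv track=rewrite | github.com/54nt14g0/taller_alfabetos_TLF | Alfabetos.py | combinar_caracteres
-- ===== SOURCE A (Python) =====
-- def combinar_caracteres(caracteres, longitud_deseada, limite):
--     combinaciones = ['']  # Lista inicial con una cadena vacía para empezar las combinaciones
--
--     # Bucle para generar combinaciones hasta alcanzar la longitud deseada
--     for _ in range(longitud_deseada):
--         nuevas_combinaciones = []  # Almacena las nuevas combinaciones generadas en cada iteración
--         for combinacion in combinaciones:
--             # Para cada combinación actual, se agregan caracteres del alfabeto
--             for caracter in caracteres:
--                 if len(nuevas_combinaciones) >= limite:  # Si alcanzamos el límite de combinaciones, detenemos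
--                     break
--                 nuevas_combinaciones.append(combinacion + caracter)  # Añadimos el carácter a la combinación
--
--         combinaciones = nuevas_combinaciones  # Actualizamos las combinaciones con las nuevas generadas
--
--     return combinaciones  # Retornamos la lista de combinaciones generadas
-- ===== SOURCE B (Python) =====
-- def combinar_caracteres(caracteres, longitud_deseada, limite):
--     # Closed-form indexing: the i-th capped combination is the longitud-digit
--     # base-len(caracteres) expansion of i, instead of building layer by layer.
--     if longitud_deseada <= 0:
--         return ['']
--     if limite <= 0:
--         return []
--     base = len(caracteres)
--     if base == 0:
--         return []
--     total = min(limite, base ** longitud_deseada)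
--     resultado = []
--     for i in range(total):
--         digitos = []
--         x = i
--         for _ in range(longitud_deseada):
--             digitos.append(caracteres[x % base])
--             x //= base
--         resultado.append(''.join(reversed(digitos)))
--     return resultado
-- ===== Notes on version B (the rewrite author's own statement) =====
-- stated objective: alternative
-- what changed: Replaces A's layer-by-layer capped accumulation (which rebuilds the combination list longitud times with a guard test per (prefix, character) pair) by closed-form indexing: the i-th output is computed independently as the longitud-digit base-len(caracteres) expansion of i, for i < min(limite, base**longitud).
import Mathlib
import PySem

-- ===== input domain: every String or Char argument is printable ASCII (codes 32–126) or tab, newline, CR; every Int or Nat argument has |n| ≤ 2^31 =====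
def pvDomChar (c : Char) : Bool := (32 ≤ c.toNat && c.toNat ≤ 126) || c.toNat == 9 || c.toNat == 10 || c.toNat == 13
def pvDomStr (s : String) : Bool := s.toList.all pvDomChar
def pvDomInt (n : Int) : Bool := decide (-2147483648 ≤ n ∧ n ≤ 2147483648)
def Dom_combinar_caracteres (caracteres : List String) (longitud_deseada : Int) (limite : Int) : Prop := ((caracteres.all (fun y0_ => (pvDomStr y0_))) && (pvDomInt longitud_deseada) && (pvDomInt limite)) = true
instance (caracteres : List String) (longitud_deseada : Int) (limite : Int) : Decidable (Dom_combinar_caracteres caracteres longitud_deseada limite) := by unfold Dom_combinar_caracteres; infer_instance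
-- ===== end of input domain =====

-- B replaces A's layer-by-layer capped accumulation by closed-form indexing (the i-th
-- output is the longitud-digit base-|caracteres| expansion of i): a genuinely different
-- algorithm producing the same list.


-- ===== PORT A =====
-- Transliteration: the inner 'break' only skips the rest of the caracteres loop and the
-- guard is re-checked before every append, so the inner loop is the guarded fold below.
def combinar_caracteres (caracteres : List String) (longitud_deseada : Int) (limite : Int) : List String :=
  (PySem.List.pyRange 0 longitud_deseada 1).foldl
    (fun combinaciones _ =>
      combinaciones.foldl
        (fun nuevas combinacion =>
          caracteres.foldl
            (fun nuevas caracter =>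
              if limite ≤ (nuevas.length : Int) then nuevas
              else nuevas ++ [combinacion ++ caracter])
            nuevas)
        [])
    [""]

-- ===== PORT B =====
-- digit loop of Source B: x starts at i ≥ 0, so 'x % base' and 'x //= base' are Nat mod/div
-- (Python's % and // agree with them on nonnegative operands) and 0 ≤ x % base < base =
-- caracteres.length, where Python's caracteres[x % base] is exactly List.getD.
def pvDigitos (caracteres : List String) (base : Nat) : Nat → Nat → List String
  | 0, _ => []
  | n + 1, x => caracteres.getD (x % base) "" :: pvDigitos caracteres base n (x / base)

def combinar_caracteres_alt (caracteres : List String) (longitud_deseada : Int) (limite : Int) : List String :=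
  if longitud_deseada ≤ 0 then [""]
  else if limite ≤ 0 then []
  else
    let base := caracteres.length
    if base = 0 then []
    else
      -- at this point limite > 0, so Python's min(limite, base ** longitud_deseada) is this Nat min
      let total : Nat := min limite.toNat (base ^ longitud_deseada.toNat)
      (List.range total).map (fun i =>
        PySem.Str.join "" (pvDigitos caracteres base longitud_deseada.toNat i).reverse)

-- ===== PRECONDITION & SPEC =====
def Spec_combinar_caracteres (caracteres : List String) (longitud_deseada : Int) (limite : Int) (out : List String) : Prop := out = combinar_caracteres_alt caracteres longitud_deseada limite
instance (caracteres : List String) (longitud_deseada : Int) (limite : Int) (out : List String) : Decidable (Spec_combinar_caracteres caracteres longitud_deseada limite out) := by unfold Spec_combinar_caracteres; infer_instance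

-- ===== CLAIM (what is proved, stated in full; the proofs are below) =====
def Claim_equal_combinar_caracteres : Prop := ∀ (caracteres : List String) (longitud_deseada : Int) (limite : Int), Dom_combinar_caracteres caracteres longitud_deseada limite → Spec_combinar_caracteres caracteres longitud_deseada limite (combinar_caracteres caracteres longitud_deseada limite)

-- ===== LEMMAS AND PROOFS =====

-- proof-side names for the pieces of the two programs
def pvExpand (caracteres : List String) (s : String) : List String :=
  caracteres.map (fun c => s ++ c)

def pvLayer (caracteres : List String) (limite : Int) (combinaciones : List String) : List String :=
  combinaciones.foldl
    (fun nuevas combinacion =>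
      caracteres.foldl
        (fun nuevas caracter =>
          if limite ≤ (nuevas.length : Int) then nuevas
          else nuevas ++ [combinacion ++ caracter])
        nuevas)
    []

def pvIter (g : List String → List String) : Nat → List String → List String
  | 0, s => s
  | n + 1, s => g (pvIter g n s)

def pvProd (caracteres : List String) : Nat → List String
  | 0 => [""]
  | n + 1 => (pvProd caracteres n).flatMap (pvExpand caracteres)

def pvStrOf (caracteres : List String) (n i : Nat) : String :=
  PySem.Str.join "" (pvDigitos caracteres caracteres.length n i).reverse

-- the guarded fold appends a prefix of the remaining items
theorem pv_capfold (limite : Int) (c : String) (ys acc : List String) :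
    ys.foldl
        (fun a y => if limite ≤ (a.length : Int) then a else a ++ [c ++ y]) acc
      = acc ++ (ys.map (fun y => c ++ y)).take (limite.toNat - acc.length) := by
  induction ys generalizing acc with
  | nil => simp
  | cons y t ih =>
    by_cases h : limite ≤ (acc.length : Int)
    · have h0 : limite.toNat - acc.length = 0 := by omega
      rw [List.foldl_cons, if_pos h, ih]
      simp [h0]
    · have h1 : limite.toNat - acc.length = (limite.toNat - (acc.length + 1)) + 1 := by omega
      rw [List.foldl_cons, if_neg h, ih]
      rw [h1, List.map_cons, List.take_succ_cons]
      simp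

theorem pv_take_mid {α : Type} (k : Nat) (acc fc r : List α) :
    List.take k (acc ++ (List.take (k - acc.length) fc ++ r))
      = List.take k (acc ++ (fc ++ r)) := by
  rw [List.take_append, List.take_append, List.take_append, List.take_append]
  have h1 : (List.take (k - acc.length) fc).take (k - acc.length) = fc.take (k - acc.length) := by
    rw [List.take_take]; simp
  rw [h1]
  have h2 : k - acc.length - (List.take (k - acc.length) fc).length
      = k - acc.length - fc.length := by
    rw [List.length_take]; omega
  rw [h2]

-- one layer of A is a capped flatMap
theorem pv_layer_fold (caracteres : List String) (limite : Int) (xs acc : List String)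
    (hacc : acc.length ≤ limite.toNat) :
    xs.foldl
      (fun nuevas combinacion =>
        caracteres.foldl
          (fun nuevas caracter =>
            if limite ≤ (nuevas.length : Int) then nuevas
            else nuevas ++ [combinacion ++ caracter])
          nuevas)
      acc
      = (acc ++ xs.flatMap (fun s => caracteres.map (fun c => s ++ c))).take limite.toNat := by
  induction xs generalizing acc with
  | nil => simp [List.take_of_length_le hacc]
  | cons c xs ih =>
    rw [List.foldl_cons, pv_capfold limite c caracteres acc, ih]
    · rw [List.flatMap_cons, List.append_assoc, pv_take_mid]
    · rw [List.length_append, List.length_take]; omega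

theorem pv_layer_eq (caracteres : List String) (limite : Int) (xs : List String) :
    pvLayer caracteres limite xs = (xs.flatMap (pvExpand caracteres)).take limite.toNat := by
  unfold pvLayer
  rw [pv_layer_fold caracteres limite xs [] (by simp)]
  rfl

theorem pv_flatMap_nil (caracteres : List String) (h : caracteres = []) (xs : List String) :
    xs.flatMap (pvExpand caracteres) = [] := by
  subst h; simp [pvExpand]

theorem pv_length_flatMap (caracteres : List String) (xs : List String) :
    (xs.flatMap (pvExpand caracteres)).length = xs.length * caracteres.length := by
  induction xs with
  | nil => simp
  | cons c t ih => simp [pvExpand, ih, Nat.succ_mul]; omega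

-- capping the prefixes before expanding does not change the first k expansions
theorem pv_take_flatMap_take (caracteres : List String) (h : caracteres ≠ []) (k : Nat)
    (xs : List String) :
    ((xs.take k).flatMap (pvExpand caracteres)).take k
      = (xs.flatMap (pvExpand caracteres)).take k := by
  by_cases hlen : xs.length ≤ k
  · rw [List.take_of_length_le hlen]
  · conv_rhs => rw [← List.take_append_drop k xs]
    rw [List.flatMap_append, List.take_append]
    have hc : 0 < caracteres.length := List.length_pos_of_ne_nil h
    have hA : ((xs.take k).flatMap (pvExpand caracteres)).length = (min k xs.length) * caracteres.length := by
      rw [pv_length_flatMap, List.length_take]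
    have h0 : k - ((xs.take k).flatMap (pvExpand caracteres)).length = 0 := by
      rw [hA]; have : min k xs.length = k := by omega
      rw [this]; exact Nat.sub_eq_zero_of_le (Nat.le_mul_of_pos_right k hc)
    rw [h0, List.take_zero, List.append_nil]

theorem pv_foldl_range_const (g : List String → List String) (n : Nat) (init : List String) :
    (List.range n).foldl (fun s _ => g s) init = pvIter g n init := by
  induction n with
  | zero => simp [pvIter]
  | succ m ih => rw [List.range_succ, List.foldl_append, ih]; simp [pvIter]

-- main loop invariant: after m+1 layers A holds the first `limite` products of length m+1
theorem pv_iter_eq (caracteres : List String) (limite : Int) (m : Nat) :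
    pvIter (pvLayer caracteres limite) (m + 1) [""]
      = (pvProd caracteres (m + 1)).take limite.toNat := by
  induction m with
  | zero =>
    show pvLayer caracteres limite [""] = _
    rw [pv_layer_eq]
    rfl
  | succ m ih =>
    show pvLayer caracteres limite (pvIter (pvLayer caracteres limite) (m + 1) [""]) = _
    rw [ih, pv_layer_eq]
    by_cases h : caracteres = []
    · rw [pv_flatMap_nil caracteres h,
        show pvProd caracteres (m + 1 + 1)
          = (pvProd caracteres (m + 1)).flatMap (pvExpand caracteres) from rfl,
        pv_flatMap_nil caracteres h]
    · rw [pv_take_flatMap_take caracteres h]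
      rfl

theorem pv_flatten_intersperse_nil (l : List (List Char)) :
    (List.intersperse ([] : List Char) l).flatten = l.flatten := by
  induction l with
  | nil => simp
  | cons a t ih =>
    cases t with
    | nil => simp
    | cons b u => simp only [List.intersperse_cons₂] at *; simp [ih]

theorem pv_chars_join_nil_sep (l : List (List Char)) :
    PySem.Chars.join [] l = l.flatten := by
  simp [PySem.Chars.join, List.intercalate, pv_flatten_intersperse_nil]

theorem pv_join_append (l : List String) (c : String) :
    PySem.Str.join "" (l ++ [c]) = PySem.Str.join "" l ++ c := by
  simp [PySem.Str.join, pv_chars_join_nil_sep, String.ofList_append]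

theorem pv_join_nil : PySem.Str.join "" ([] : List String) = "" := by
  simp [PySem.Str.join]

theorem pv_strOf_succ (caracteres : List String) (n i : Nat) :
    pvStrOf caracteres (n + 1) i
      = pvStrOf caracteres n (i / caracteres.length)
          ++ caracteres.getD (i % caracteres.length) "" := by
  simp [pvStrOf, pvDigitos, List.reverse_cons, pv_join_append]

theorem pv_range_mul (N b : Nat) :
    List.range (N * b)
      = (List.range N).flatMap (fun j => (List.range b).map (fun r => j * b + r)) := by
  induction N with
  | zero => simp
  | succ m ih =>
    rw [Nat.succ_mul, List.range_add, ih, List.range_succ, List.flatMap_append]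
    simp

theorem pv_map_getD (g : String → String) (l : List String) :
    l.map g = (List.range l.length).map (fun r => g (l.getD r "")) := by
  induction l with
  | nil => simp
  | cons a t ih =>
    simp only [List.length_cons, List.range_succ_eq_map, List.map_cons, List.map_map,
      List.getD_cons_zero]
    congr 1

-- elementwise, the length-n product list is the base-b digit expansion
theorem pv_prod_eq_map (caracteres : List String) (h : caracteres ≠ []) (n : Nat) :
    pvProd caracteres n
      = (List.range (caracteres.length ^ n)).map (pvStrOf caracteres n) := by
  have hb : 0 < caracteres.length := List.length_pos_of_ne_nil h
  induction n with
  | zero =>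
    simp [pvProd, pvStrOf, pvDigitos, pv_join_nil]
  | succ n ih =>
    rw [show pvProd caracteres (n + 1) = (pvProd caracteres n).flatMap (pvExpand caracteres) from rfl]
    rw [ih, List.flatMap_map]
    rw [pow_succ, pv_range_mul, List.map_flatMap]
    refine congrArg (fun h => List.flatMap h (List.range (caracteres.length ^ n))) ?_
    funext j
    rw [List.map_map]
    rw [show pvExpand caracteres (pvStrOf caracteres n j)
        = (List.range caracteres.length).map
            (fun r => pvStrOf caracteres n j ++ caracteres.getD r "") from
      pv_map_getD _ caracteres]
    apply List.map_congr_left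
    intro r hr
    have hrb : r < caracteres.length := List.mem_range.mp hr
    show pvStrOf caracteres n j ++ caracteres.getD r ""
        = pvStrOf caracteres (n + 1) (j * caracteres.length + r)
    rw [pv_strOf_succ]
    have hdiv : (j * caracteres.length + r) / caracteres.length = j := by
      rw [Nat.mul_comm j, Nat.mul_add_div hb, Nat.div_eq_of_lt hrb, Nat.add_zero]
    have hmod : (j * caracteres.length + r) % caracteres.length = r := by
      rw [Nat.mul_comm j, Nat.mul_add_mod, Nat.mod_eq_of_lt hrb]
    rw [hdiv, hmod]

theorem pv_portB_eq (caracteres : List String) (longitud_deseada limite : Int)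
    (hL : ¬ longitud_deseada ≤ 0) (hlim : ¬ limite ≤ 0) (hb : ¬ caracteres.length = 0) :
    combinar_caracteres_alt caracteres longitud_deseada limite
      = (List.range (min limite.toNat (caracteres.length ^ longitud_deseada.toNat))).map
          (pvStrOf caracteres longitud_deseada.toNat) := by
  rw [combinar_caracteres_alt, if_neg hL, if_neg hlim]
  simp only [if_neg hb]
  rfl

theorem pv_portA_iter (caracteres : List String) (longitud_deseada limite : Int) :
    combinar_caracteres caracteres longitud_deseada limite
      = pvIter (pvLayer caracteres limite) longitud_deseada.toNat [""] := by
  rw [combinar_caracteres, PySem.List.pyRange_one, List.foldl_map]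
  have h0 : (longitud_deseada - 0).toNat = longitud_deseada.toNat := by omega
  rw [h0]
  exact pv_foldl_range_const (pvLayer caracteres limite) longitud_deseada.toNat [""]

-- ===== VERDICT (by name: the statement is the Claim_ definition above) =====
theorem combinar_caracteres_spec : Claim_equal_combinar_caracteres := by
  intro caracteres longitud_deseada limite _
  unfold Spec_combinar_caracteres
  by_cases hL : longitud_deseada ≤ 0
  · rw [combinar_caracteres, combinar_caracteres_alt,
      PySem.List.pyRange_one_eq_nil hL, if_pos hL]
    rfl
  · have hL' : 0 < longitud_deseada := by omega
    have hm : longitud_deseada.toNat = (longitud_deseada.toNat - 1) + 1 := by omega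
    rw [pv_portA_iter, hm, pv_iter_eq]
    by_cases hlim : limite ≤ 0
    · have hk : limite.toNat = 0 := by omega
      rw [hk, List.take_zero, combinar_caracteres_alt, if_neg hL, if_pos hlim]
    · by_cases hc : caracteres = []
      · rw [show pvProd caracteres (longitud_deseada.toNat - 1 + 1)
            = (pvProd caracteres (longitud_deseada.toNat - 1)).flatMap (pvExpand caracteres) from rfl,
          pv_flatMap_nil caracteres hc, List.take_nil,
          combinar_caracteres_alt, if_neg hL, if_neg hlim]
        simp [hc]
      · rw [pv_prod_eq_map caracteres hc, ← List.map_take, List.take_range]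
        have hb0 : ¬ caracteres.length = 0 := by
          have := List.length_pos_of_ne_nil hc; omega
        rw [pv_portB_eq caracteres longitud_deseada limite hL hlim hb0, ← hm]
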